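-- pv_equiv track=rewrite | github.com/Nagasaki45/exerpy | sets/unique_letters.py | unique_letters_with_sets
-- ===== SOURCE A (Python) =====
-- def unique_letters_with_sets(words):
--     chars = set()
--     unique_words = []
--     for word in words:
--         word_set = set([c for c in word])
--         if word_set - chars:  # set difference
--             unique_words.append(word)
--         chars |= word_set  # set union
--     return ' '.join(unique_words)
-- ===== SOURCE B (Python) =====
-- def unique_letters_with_sets(words):
--     words = list(words)
--     first_index = {}
--     for i, word in enumerate(words):
--         for c in word:
--             if c not in first_index:
--                 first_index[c] = i
--     keep = set(first_index.values())
--     return ' '.join(word for i, word in enumerate(words) if i in keep)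
-- ===== Notes on version B (the rewrite author's own statement) =====
-- stated objective: alternative
-- what changed: Replaces the single accumulate-chars-and-test pass (which builds a set per word and takes a set difference) with two differently shaped passes: first build a dict mapping each character to the index of the first word containing it, then keep exactly the words whose index occurs among those first indices and join them.
import Mathlib
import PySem

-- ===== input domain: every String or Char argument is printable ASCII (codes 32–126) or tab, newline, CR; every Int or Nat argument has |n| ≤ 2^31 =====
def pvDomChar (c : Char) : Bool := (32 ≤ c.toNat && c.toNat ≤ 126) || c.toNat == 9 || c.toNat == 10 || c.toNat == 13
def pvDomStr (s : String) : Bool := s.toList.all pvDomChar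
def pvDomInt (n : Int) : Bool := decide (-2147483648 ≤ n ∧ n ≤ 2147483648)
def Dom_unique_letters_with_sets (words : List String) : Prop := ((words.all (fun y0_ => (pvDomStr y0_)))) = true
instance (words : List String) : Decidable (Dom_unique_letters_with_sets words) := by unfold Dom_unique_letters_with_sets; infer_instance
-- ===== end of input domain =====

-- B keeps each word whose index is the first index of some character (first-index dict +
-- index-selection pass) instead of A's running set of seen characters; same cost, different decomposition.

-- ===== PORT A =====
def unique_letters_with_sets (words : List String) : String :=
  let st := words.foldl (fun (s : PySem.Set Char × List String) word =>
    let word_set : PySem.Set Char := PySem.Set.ofList word.toList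
    let unique_words := if PySem.Set.diff word_set s.1 ≠ [] then s.2 ++ [word] else s.2
    (PySem.Set.union s.1 word_set, unique_words)) (PySem.Set.empty, [])
  PySem.Str.join " " st.2

-- ===== PORT B =====
def unique_letters_with_sets_alt (words : List String) : String :=
  let first_index : PySem.Dict Char Int :=
    (PySem.List.enumerate words).foldl (fun d p =>
      p.2.toList.foldl (fun d c => if d.contains c then d else d.insert c p.1) d)
      PySem.Dict.empty
  let keep : PySem.Set Int := PySem.Set.ofList first_index.values
  PySem.Str.join " "
    (((PySem.List.enumerate words).filter (fun p => PySem.Set.contains keep p.1)).map (·.2))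

-- ===== PRECONDITION & SPEC =====
def Spec_unique_letters_with_sets (words : List String) (out : String) : Prop := out = unique_letters_with_sets_alt words
instance (words : List String) (out : String) : Decidable (Spec_unique_letters_with_sets words out) := by unfold Spec_unique_letters_with_sets; infer_instance

-- ===== CLAIM (what is proved, stated in full; the proofs are below) =====
def Claim_equal_unique_letters_with_sets : Prop := ∀ (words : List String), Dom_unique_letters_with_sets words → Spec_unique_letters_with_sets words (unique_letters_with_sets words)

-- ===== LEMMAS AND PROOFS =====


-- the index (counting from j) of the first word of ws containing c
def pvFirstIdx (j : Int) (ws : List String) (c : Char) : Option Int :=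
  match ws with
  | [] => none
  | w :: ws => if c ∈ w.toList then some j else pvFirstIdx (j + 1) ws c

-- reference selection: the words of ws that contain a character absent from every word of pre
def pvKept (pre ws : List String) : List String :=
  match ws with
  | [] => []
  | w :: ws =>
    (if ∃ c ∈ w.toList, ∀ u ∈ pre, c ∉ u.toList then [w] else []) ++ pvKept (pre ++ [w]) ws

lemma pvFirstIdx_none (pre : List String) : ∀ (j : Int) (c : Char),
    pvFirstIdx j pre c = none ↔ ∀ u ∈ pre, c ∉ u.toList := by
  induction pre with
  | nil => simp [pvFirstIdx]
  | cons w ws ih =>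
    intro j c
    by_cases h : c ∈ w.toList <;> simp [pvFirstIdx, h, ih]

lemma pvFirstIdx_bounds : ∀ (ws : List String) (j i : Int) (c : Char),
    pvFirstIdx j ws c = some i → j ≤ i ∧ i < j + ws.length := by
  intro ws
  induction ws with
  | nil => simp [pvFirstIdx]
  | cons w ws ih =>
    intro j i c h
    by_cases hc : c ∈ w.toList
    · simp [pvFirstIdx, hc] at h
      simp only [List.length_cons]
      push_cast
      omega
    · simp [pvFirstIdx, hc] at h
      have := ih (j + 1) i c h
      simp only [List.length_cons]
      push_cast
      omega

lemma pvFirstIdx_append_some : ∀ (pre rest : List String) (j k : Int) (c : Char),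
    pvFirstIdx j pre c = some k → pvFirstIdx j (pre ++ rest) c = some k := by
  intro pre
  induction pre with
  | nil => intro rest j k c h; simp [pvFirstIdx] at h
  | cons w ws ih =>
    intro rest j k c h
    by_cases hw : c ∈ w.toList
    · simp [pvFirstIdx, hw] at h ⊢
      exact h
    · simp only [pvFirstIdx, hw, if_false, List.cons_append] at h ⊢
      exact ih rest (j + 1) k c h

lemma pvFirstIdx_append_none : ∀ (pre rest : List String) (j : Int) (c : Char),
    pvFirstIdx j pre c = none →
    pvFirstIdx j (pre ++ rest) c = pvFirstIdx (j + pre.length) rest c := by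
  intro pre
  induction pre with
  | nil => intro rest j c _; simp
  | cons w ws ih =>
    intro rest j c h
    by_cases hw : c ∈ w.toList
    · simp [pvFirstIdx, hw] at h
    · simp only [pvFirstIdx, hw, if_false, List.cons_append] at h ⊢
      rw [ih rest (j + 1) c h]
      have harg : j + 1 + (ws.length : Int) = j + ((w :: ws).length : Int) := by
        push_cast [List.length_cons]; ring
      rw [harg]

lemma pvKey_iff (pre : List String) (w : String) (rest : List String) :
    (∃ c, pvFirstIdx 0 (pre ++ w :: rest) c = some (pre.length : Int))
      ↔ ∃ c ∈ w.toList, ∀ u ∈ pre, c ∉ u.toList := by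
  constructor
  · rintro ⟨c, hc⟩
    cases hpre : pvFirstIdx 0 pre c with
    | some k =>
      rw [pvFirstIdx_append_some pre (w :: rest) 0 k c hpre] at hc
      have hb := pvFirstIdx_bounds pre 0 k c hpre
      simp at hc
      omega
    | none =>
      rw [pvFirstIdx_append_none pre (w :: rest) 0 c hpre, zero_add] at hc
      by_cases hw : c ∈ w.toList
      · exact ⟨c, hw, (pvFirstIdx_none pre 0 c).mp hpre⟩
      · simp only [pvFirstIdx, hw, if_false] at hc
        have := pvFirstIdx_bounds rest ((pre.length : Int) + 1) (pre.length : Int) c hc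
        omega
  · rintro ⟨c, hw, hp⟩
    refine ⟨c, ?_⟩
    rw [pvFirstIdx_append_none pre (w :: rest) 0 c ((pvFirstIdx_none pre 0 c).mpr hp), zero_add]
    simp [pvFirstIdx, hw]

-- ========= A side: the fold's kept list is pvKept =========

lemma A_inv : ∀ (ws : List String) (chars : PySem.Set Char) (acc pre : List String),
    (∀ c : Char, c ∈ chars ↔ ∃ u ∈ pre, c ∈ u.toList) →
    (ws.foldl (fun (s : PySem.Set Char × List String) word =>
      let word_set : PySem.Set Char := PySem.Set.ofList word.toList
      let unique_words := if PySem.Set.diff word_set s.1 ≠ [] then s.2 ++ [word] else s.2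
      (PySem.Set.union s.1 word_set, unique_words)) (chars, acc)).2 = acc ++ pvKept pre ws := by
  intro ws
  induction ws with
  | nil => intro chars acc pre _; simp [pvKept]
  | cons w ws ih =>
    intro chars acc pre hinv
    have hcond : (PySem.Set.diff (PySem.Set.ofList w.toList) chars ≠ [])
        ↔ ∃ c ∈ w.toList, ∀ u ∈ pre, c ∉ u.toList := by
      constructor
      · intro hne
        obtain ⟨c, hc⟩ := List.exists_mem_of_ne_nil _ hne
        rw [PySem.Set.mem_diff, PySem.Set.mem_ofList] at hc
        exact ⟨c, hc.1, fun u hu hcu => hc.2 ((hinv c).mpr ⟨u, hu, hcu⟩)⟩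
      · rintro ⟨c, hw, hp⟩ hnil
        have hmem : c ∈ PySem.Set.diff (PySem.Set.ofList w.toList) chars := by
          rw [PySem.Set.mem_diff, PySem.Set.mem_ofList]
          exact ⟨hw, fun hc => by obtain ⟨u, hu, hcu⟩ := (hinv c).mp hc; exact hp u hu hcu⟩
        rw [hnil] at hmem
        exact List.not_mem_nil hmem
    have hinv' : ∀ c : Char, c ∈ PySem.Set.union chars (PySem.Set.ofList w.toList)
        ↔ ∃ u ∈ pre ++ [w], c ∈ u.toList := by
      intro c
      rw [PySem.Set.mem_union, PySem.Set.mem_ofList, hinv c]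
      constructor
      · rintro (⟨u, hu, hcu⟩ | hcw)
        · exact ⟨u, by simp [hu], hcu⟩
        · exact ⟨w, by simp, hcw⟩
      · rintro ⟨u, hu, hcu⟩
        rcases List.mem_append.mp hu with hu | hu
        · exact Or.inl ⟨u, hu, hcu⟩
        · simp at hu; subst hu; exact Or.inr hcu
    rw [List.foldl_cons]
    show (ws.foldl (fun (s : PySem.Set Char × List String) word =>
        let word_set : PySem.Set Char := PySem.Set.ofList word.toList
        let unique_words := if PySem.Set.diff word_set s.1 ≠ [] then s.2 ++ [word] else s.2
        (PySem.Set.union s.1 word_set, unique_words))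
      (PySem.Set.union chars (PySem.Set.ofList w.toList),
       if PySem.Set.diff (PySem.Set.ofList w.toList) chars ≠ [] then acc ++ [w] else acc)).2
      = acc ++ pvKept pre (w :: ws)
    by_cases h : ∃ c ∈ w.toList, ∀ u ∈ pre, c ∉ u.toList
    · rw [if_pos (hcond.mpr h), ih _ _ _ hinv', pvKept, if_pos h]
      simp
    · rw [if_neg (fun hh => h (hcond.mp hh)), ih _ _ _ hinv', pvKept, if_neg h]
      simp

-- ========= B side: the dict's lookups are pvFirstIdx, the selection is pvKept =========

lemma pvGetNone {d : PySem.Dict Char Int} {c : Char} (h : ¬ d.contains c = true) :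
    d.get? c = none := by
  rw [PySem.Dict.contains_eq_isSome_get?] at h
  exact Option.not_isSome_iff_eq_none.mp h

lemma B_inner (cs : List Char) : ∀ (d : PySem.Dict Char Int) (i : Int) (c : Char),
    (cs.foldl (fun d c => if d.contains c then d else d.insert c i) d).get? c
      = if d.contains c then d.get? c else if c ∈ cs then some i else none := by
  induction cs with
  | nil =>
    intro d i c
    by_cases h : d.contains c
    · simp [h]
    · simp [h, pvGetNone h]
  | cons x cs ih =>
    intro d i c
    simp only [List.foldl_cons]
    by_cases hx : d.contains x
    · rw [if_pos hx, ih]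
      by_cases hc : d.contains c
      · simp [hc]
      · have hcx : c ≠ x := fun h => by rw [h] at hc; exact hc hx
        simp [hc, hcx]
    · rw [if_neg hx, ih]
      by_cases hcx : c = x
      · subst hcx
        have h1 : (d.insert c i).contains c = true := by
          rw [PySem.Dict.contains_eq_isSome_get?, PySem.Dict.get?_insert]
          simp
        simp [h1, hx]
      · have h1 : (d.insert x i).contains c = d.contains c := by
          rw [PySem.Dict.contains_eq_isSome_get?, PySem.Dict.contains_eq_isSome_get?,
            PySem.Dict.get?_insert, if_neg hcx]
        rw [h1]
        by_cases hc : d.contains c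
        · simp [hc, PySem.Dict.get?_insert, hcx]
        · simp [hc, hcx]

lemma B_outer : ∀ (ws : List String) (i0 : Int) (d : PySem.Dict Char Int) (c : Char),
    ((PySem.List.enumerate ws i0).foldl (fun d p =>
        p.2.toList.foldl (fun d c => if d.contains c then d else d.insert c p.1) d) d).get? c
      = if d.contains c then d.get? c else pvFirstIdx i0 ws c := by
  intro ws
  induction ws with
  | nil =>
    intro i0 d c
    simp only [PySem.List.enumerate_nil, List.foldl_nil, pvFirstIdx]
    by_cases h : d.contains c
    · simp [h]
    · simp [h, pvGetNone h]
  | cons w ws ih =>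
    intro i0 d c
    rw [PySem.List.enumerate_cons, List.foldl_cons, ih]
    have hmid := B_inner w.toList d i0 c
    by_cases hc : d.contains c
    · have h1 : (w.toList.foldl (fun d c => if d.contains c then d else d.insert c i0) d).get? c
          = d.get? c := by rw [hmid, if_pos hc]
      have h2 : (w.toList.foldl (fun d c => if d.contains c then d else d.insert c i0) d).contains c
          = true := by
        rw [PySem.Dict.contains_eq_isSome_get?, h1, ← PySem.Dict.contains_eq_isSome_get?]; exact hc
      rw [if_pos h2, h1, if_pos hc]
    · rw [if_neg hc]
      show _ = pvFirstIdx i0 (w :: ws) c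
      by_cases hw : c ∈ w.toList
      · have h1 : (w.toList.foldl (fun d c => if d.contains c then d else d.insert c i0) d).get? c
            = some i0 := by rw [hmid, if_neg hc, if_pos hw]
        have h2 : (w.toList.foldl (fun d c => if d.contains c then d else d.insert c i0) d).contains c
            = true := by rw [PySem.Dict.contains_eq_isSome_get?, h1]; rfl
        rw [if_pos h2, h1]
        simp [pvFirstIdx, hw]
      · have h1 : (w.toList.foldl (fun d c => if d.contains c then d else d.insert c i0) d).get? c
            = none := by rw [hmid, if_neg hc, if_neg hw]
        have h2 : ¬ (w.toList.foldl (fun d c => if d.contains c then d else d.insert c i0) d).contains c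
            = true := by rw [PySem.Dict.contains_eq_isSome_get?, h1]; simp
        rw [if_neg h2]
        simp [pvFirstIdx, hw]

lemma B_nodup_inner (cs : List Char) : ∀ (d : PySem.Dict Char Int) (i : Int),
    d.keys.Nodup → (cs.foldl (fun d c => if d.contains c then d else d.insert c i) d).keys.Nodup := by
  induction cs with
  | nil => intro d i h; simpa
  | cons x cs ih =>
    intro d i h
    simp only [List.foldl_cons]
    by_cases hx : d.contains x
    · rw [if_pos hx]; exact ih d i h
    · rw [if_neg hx]; exact ih _ i (PySem.Dict.nodup_keys_insert d x i h)

lemma B_nodup : ∀ (ws : List (Int × String)) (d : PySem.Dict Char Int),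
    d.keys.Nodup → (ws.foldl (fun d p =>
      p.2.toList.foldl (fun d c => if d.contains c then d else d.insert c p.1) d) d).keys.Nodup := by
  intro ws
  induction ws with
  | nil => intro d h; simpa
  | cons p ws ih => intro d h; exact ih _ (B_nodup_inner p.2.toList d p.1 h)

lemma B_keep_iff (words : List String) (i : Int) :
    PySem.Set.contains (PySem.Set.ofList
      ((PySem.List.enumerate words).foldl (fun d p =>
        p.2.toList.foldl (fun d c => if d.contains c then d else d.insert c p.1) d)
        PySem.Dict.empty).values) i = true
      ↔ ∃ c, pvFirstIdx 0 words c = some i := by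
  set fi := (PySem.List.enumerate words).foldl (fun d p =>
      p.2.toList.foldl (fun d c => if d.contains c then d else d.insert c p.1) d)
      PySem.Dict.empty with hfi
  have hnd : fi.keys.Nodup := B_nodup _ _ (by simp [PySem.Dict.keys_empty])
  have hget : ∀ c, fi.get? c = pvFirstIdx 0 words c := by
    intro c
    rw [hfi, B_outer]
    simp [PySem.Dict.contains_empty]
  rw [PySem.Set.contains_iff, PySem.Set.mem_ofList]
  constructor
  · intro hv
    obtain ⟨⟨c, v⟩, hmem, hv2⟩ := List.mem_map.mp hv
    refine ⟨c, ?_⟩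
    rw [← hget c]
    cases hv2
    exact PySem.Dict.get?_of_mem_items fi hmem hnd
  · rintro ⟨c, hc⟩
    have hsome : fi.get? c = some i := by rw [hget]; exact hc
    exact List.mem_map.mpr ⟨(c, i), PySem.Dict.mem_items_of_get?_eq_some fi hsome, rfl⟩

lemma B_filter_eq_kept : ∀ (ws pre : List String) (p : Int × String → Bool),
    (∀ i w, p (i, w) = decide (∃ c, pvFirstIdx 0 (pre ++ ws) c = some i)) →
    (((PySem.List.enumerate ws (pre.length : Int)).filter p).map (·.2)) = pvKept pre ws := by
  intro ws
  induction ws with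
  | nil => intro pre p _; simp [pvKept, PySem.List.enumerate_nil]
  | cons w ws ih =>
    intro pre p hp
    rw [PySem.List.enumerate_cons, List.filter_cons]
    have hassoc : pre ++ w :: ws = (pre ++ [w]) ++ ws := by simp
    have htail : ((PySem.List.enumerate ws ((pre.length : Int) + 1)).filter p).map (·.2)
        = pvKept (pre ++ [w]) ws := by
      have hlen : (((pre ++ [w]).length : Nat) : Int) = (pre.length : Int) + 1 := by simp
      rw [← hlen]
      exact ih (pre ++ [w]) p (fun i v => by rw [hp i v, hassoc])
    by_cases h : ∃ c ∈ w.toList, ∀ u ∈ pre, c ∉ u.toList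
    · have hpb : p ((pre.length : Int), w) = true := by
        rw [hp]; exact decide_eq_true ((pvKey_iff pre w ws).mpr h)
      rw [if_pos hpb, List.map_cons, htail, pvKept, if_pos h]
      simp
    · have hpb : ¬ p ((pre.length : Int), w) = true := by
        rw [hp]
        simp only [decide_eq_true_eq]
        exact fun hh => h ((pvKey_iff pre w ws).mp hh)
      rw [if_neg hpb, htail, pvKept, if_neg h]
      simp

-- ===== VERDICT (by name: the statement is the Claim_ definition above) =====
theorem unique_letters_with_sets_spec : Claim_equal_unique_letters_with_sets := by
  intro words _
  show unique_letters_with_sets words = unique_letters_with_sets_alt words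
  simp only [unique_letters_with_sets, unique_letters_with_sets_alt]
  congr 1
  rw [A_inv words PySem.Set.empty [] [] (by simp [PySem.Set.empty]), List.nil_append]
  have hfilt := B_filter_eq_kept words []
    (fun p => PySem.Set.contains (PySem.Set.ofList
      ((PySem.List.enumerate words).foldl (fun d q =>
        q.2.toList.foldl (fun d c => if d.contains c then d else d.insert c q.1) d)
        PySem.Dict.empty).values) p.1)
    (fun i w => by
      simp only [List.nil_append]
      rw [Bool.eq_iff_iff, decide_eq_true_eq]
      exact B_keep_iff words i)
  simp only [List.length_nil, Nat.cast_zero] at hfilt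
  exact hfilt.symm
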